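-- pv_equiv track=rewrite | github.com/benjamin-karaoglan/AppArtAgent | backend/app/services/dvf_service.py | _normalize_street_type
-- ===== SOURCE A (Python) =====
-- _STREET_TYPE_TO_DVF: dict[str, str] = {
--     "AVENUE": "AV",
--     "BOULEVARD": "BD",
--     "ROUTE": "RTE",
--     "CHEMIN": "CHE",
--     "ALLEE": "ALL",
--     "ALLEES": "ALL",
--     "IMPASSE": "IMP",
--     "PLACE": "PL",
--     "RESIDENCE": "RES",
--     "COURS": "CRS",
--     "SQUARE": "SQ",
--     "RUELLE": "RLE",
--     "MONTEE": "MTE",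
--     "PROMENADE": "PROM",
--     "TRAVERSE": "TRA",
--     "VILLA": "VLA",
--     "SENTIER": "SEN",
--     "SENTE": "SEN",
--     "FAUBOURG": "FG",
--     "HAMEAU": "HAM",
--     "DOMAINE": "DOM",
--     "CORNICHE": "COR",
--     "TERRASSE": "TSSE",
--     "ESPLANADE": "ESP",
--     "CHAUSSEE": "CHS",
--     "ROND POINT": "RPT",
--     "QUARTIER": "QUA",
--     "PASSAGE": "PAS",
--     "LOTISSEMENT": "LOT",
-- }
--
-- def _normalize_street_type(normalized_name: str) -> str:
--     """
--     Replace full street type words with their DVF abbreviations.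
--
--     "BOULEVARD RICHARD WALLACE" → "BD RICHARD WALLACE"
--     "AVENUE DE LA CALIFORNIE"   → "AV DE LA CALIFORNIE"
--
--     Handles both single-word types (first word) and multi-word types like "ROND POINT".
--     """
--     if not normalized_name:
--         return normalized_name
--
--     # Check multi-word types first (e.g. "ROND POINT" → "RPT")
--     for full, abbr in _STREET_TYPE_TO_DVF.items():
--         if " " in full and normalized_name.startswith(full + " "):
--             return abbr + normalized_name[len(full) :]
--
--     # Check single-word types (first word only)
--     parts = normalized_name.split(" ", 1)
--     if parts[0] in _STREET_TYPE_TO_DVF: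
--         abbr = _STREET_TYPE_TO_DVF[parts[0]]
--         return abbr + " " + parts[1] if len(parts) > 1 else abbr
--
--     return normalized_name
-- ===== SOURCE B (Python) =====
-- _STREET_TYPE_TO_DVF: dict[str, str] = {
--     "AVENUE": "AV",
--     "BOULEVARD": "BD",
--     "ROUTE": "RTE",
--     "CHEMIN": "CHE",
--     "ALLEE": "ALL",
--     "ALLEES": "ALL",
--     "IMPASSE": "IMP",
--     "PLACE": "PL",
--     "RESIDENCE": "RES",
--     "COURS": "CRS",
--     "SQUARE": "SQ",
--     "RUELLE": "RLE",
--     "MONTEE": "MTE",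
--     "PROMENADE": "PROM",
--     "TRAVERSE": "TRA",
--     "VILLA": "VLA",
--     "SENTIER": "SEN",
--     "SENTE": "SEN",
--     "FAUBOURG": "FG",
--     "HAMEAU": "HAM",
--     "DOMAINE": "DOM",
--     "CORNICHE": "COR",
--     "TERRASSE": "TSSE",
--     "ESPLANADE": "ESP",
--     "CHAUSSEE": "CHS",
--     "ROND POINT": "RPT",
--     "QUARTIER": "QUA",
--     "PASSAGE": "PAS",
--     "LOTISSEMENT": "LOT",
-- }
--
--
-- def _normalize_street_type(normalized_name: str) -> str:
--     # Single character scan: record the positions of the first two spaces,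
--     # then splice the abbreviation in by index — no split(), no table scan.
--     cuts = []
--     for i, ch in enumerate(normalized_name):
--         if ch == " ":
--             cuts.append(i)
--             if len(cuts) == 2:
--                 break
--     if len(cuts) == 2:
--         # candidate two-word prefix (it ends right before the second space)
--         abbr = _STREET_TYPE_TO_DVF.get(normalized_name[:cuts[1]])
--         if abbr is not None:
--             return abbr + normalized_name[cuts[1]:]
--     cut = cuts[0] if cuts else len(normalized_name)
--     abbr = _STREET_TYPE_TO_DVF.get(normalized_name[:cut])
--     if abbr is not None:
--         return abbr + normalized_name[cut:]
--     return normalized_name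
-- ===== Notes on version B (the rewrite author's own statement) =====
-- stated objective: alternative
-- what changed: B replaces A's scan over the dict's items and its one-bounded split by a single character scan that records the positions of the first two spaces and splices the abbreviation in by index (dict.get on the sliced prefix), with no split and no table iteration.
import Mathlib
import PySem

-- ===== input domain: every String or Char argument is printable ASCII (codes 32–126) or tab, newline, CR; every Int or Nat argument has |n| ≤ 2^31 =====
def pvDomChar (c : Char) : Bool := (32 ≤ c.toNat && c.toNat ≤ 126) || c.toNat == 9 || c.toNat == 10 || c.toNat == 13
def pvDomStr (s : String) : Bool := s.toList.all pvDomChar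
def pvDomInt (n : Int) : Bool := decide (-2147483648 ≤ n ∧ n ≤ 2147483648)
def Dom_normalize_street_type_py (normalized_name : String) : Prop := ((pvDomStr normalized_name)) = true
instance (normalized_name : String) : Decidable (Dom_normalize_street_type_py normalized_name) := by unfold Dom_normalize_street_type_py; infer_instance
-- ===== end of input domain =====

-- B replaces A's scan over the dict items and its one-bounded split by a single character scan that
-- records the positions of the first two spaces and splices the abbreviation in by index
-- (objective: alternative).

-- The module constant _STREET_TYPE_TO_DVF (shared by both Pythons), as its insertion-ordered pairs.
def pvPairs : List (List Char × List Char) :=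
  [("AVENUE".toList, "AV".toList), ("BOULEVARD".toList, "BD".toList), ("ROUTE".toList, "RTE".toList),
   ("CHEMIN".toList, "CHE".toList), ("ALLEE".toList, "ALL".toList), ("ALLEES".toList, "ALL".toList),
   ("IMPASSE".toList, "IMP".toList), ("PLACE".toList, "PL".toList), ("RESIDENCE".toList, "RES".toList),
   ("COURS".toList, "CRS".toList), ("SQUARE".toList, "SQ".toList), ("RUELLE".toList, "RLE".toList),
   ("MONTEE".toList, "MTE".toList), ("PROMENADE".toList, "PROM".toList), ("TRAVERSE".toList, "TRA".toList),
   ("VILLA".toList, "VLA".toList), ("SENTIER".toList, "SEN".toList), ("SENTE".toList, "SEN".toList),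
   ("FAUBOURG".toList, "FG".toList), ("HAMEAU".toList, "HAM".toList), ("DOMAINE".toList, "DOM".toList),
   ("CORNICHE".toList, "COR".toList), ("TERRASSE".toList, "TSSE".toList), ("ESPLANADE".toList, "ESP".toList),
   ("CHAUSSEE".toList, "CHS".toList), ("ROND POINT".toList, "RPT".toList), ("QUARTIER".toList, "QUA".toList),
   ("PASSAGE".toList, "PAS".toList), ("LOTISSEMENT".toList, "LOT".toList)]

def pvDvf : PySem.Dict (List Char) (List Char) := PySem.Dict.ofList pvPairs

-- ===== PORT A =====
-- the 'for full, abbr in _STREET_TYPE_TO_DVF.items(): …' loop (returns some = early return)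
def pvALoop : List (List Char × List Char) → List Char → Option (List Char)
  | [], _ => none
  | (full, abbr) :: rest, s =>
    if PySem.Chars.isIn [' '] full && PySem.Chars.startswith s (full ++ [' ']) then
      some (abbr ++ PySem.Chars.slice s (some (PySem.Chars.len full)) none)
    else pvALoop rest s

-- A's tail: parts = s.split(" ", 1); membership test, then dict[parts[0]]
def pvASingle (s : List Char) : List Char :=
  let parts := (PySem.Chars.splitMax? s [' '] 1).getD []
  if pvDvf.contains (PySem.List.pyGetD parts 0 []) then
    let abbr := pvDvf.getD (PySem.List.pyGetD parts 0 []) []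
    if PySem.List.len parts > 1 then abbr ++ [' '] ++ PySem.List.pyGetD parts 1 [] else abbr
  else s

def pvAChars (s : List Char) : List Char :=
  if s = [] then s
  else
    match pvALoop pvDvf.items s with
    | some r => r
    | none => pvASingle s

def normalize_street_type_py (normalized_name : String) : String :=
  String.ofList (pvAChars normalized_name.toList)

-- ===== PORT B =====
-- B's scan 'for i, ch in enumerate(normalized_name): if ch == " ": cuts.append(i); if len(cuts) == 2: break'
def pvCutsGo : List (Int × Char) → List Int → List Int
  | [], cuts => cuts
  | (i, ch) :: rest, cuts =>
    if ch = ' ' then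
      let cuts' := cuts ++ [i]
      if PySem.List.len cuts' = 2 then cuts' else pvCutsGo rest cuts'
    else pvCutsGo rest cuts

-- B's lines after the two-cut attempt: cut = cuts[0] if cuts else len(s); get; splice
def pvBTail (s : List Char) (cuts : List Int) : List Char :=
  let cut : Int := if cuts ≠ [] then PySem.List.pyGetD cuts 0 0 else (s.length : Int)
  match pvDvf.get? (PySem.Chars.slice s none (some cut)) with
  | some abbr => abbr ++ PySem.Chars.slice s (some cut) none
  | none => s

def pvBChars (s : List Char) : List Char :=
  let cuts := pvCutsGo (PySem.List.enumerate s 0) []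
  if PySem.List.len cuts = 2 then
    match pvDvf.get? (PySem.Chars.slice s none (some (PySem.List.pyGetD cuts 1 0))) with
    | some abbr => abbr ++ PySem.Chars.slice s (some (PySem.List.pyGetD cuts 1 0)) none
    | none => pvBTail s cuts
  else pvBTail s cuts

def normalize_street_type_py_alt (normalized_name : String) : String :=
  String.ofList (pvBChars normalized_name.toList)

-- ===== PRECONDITION & SPEC =====
def Spec_normalize_street_type_py (normalized_name : String) (out : String) : Prop := out = normalize_street_type_py_alt normalized_name
instance (normalized_name : String) (out : String) : Decidable (Spec_normalize_street_type_py normalized_name out) := by unfold Spec_normalize_street_type_py; infer_instance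

-- ===== CLAIM (what is proved, stated in full; the proofs are below) =====
def Claim_equal_normalize_street_type_py : Prop := ∀ (normalized_name : String), Dom_normalize_street_type_py normalized_name → Spec_normalize_street_type_py normalized_name (normalize_street_type_py normalized_name)

-- ===== LEMMAS AND PROOFS =====

theorem pvItems_eq : pvDvf.items = pvPairs := by decide

theorem pvALoop_cons (full abbr : List Char) (rest : List (List Char × List Char)) (s : List Char) :
    pvALoop ((full, abbr) :: rest) s =
      if PySem.Chars.isIn [' '] full && PySem.Chars.startswith s (full ++ [' ']) then
        some (abbr ++ PySem.Chars.slice s (some (PySem.Chars.len full)) none)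
      else pvALoop rest s := rfl

-- A's dict scan skips every contiguous block of space-free keys
theorem pvALoop_append_nospace (l r : List (List Char × List Char)) (s : List Char)
    (h : ∀ p ∈ l, PySem.Chars.isIn [' '] p.1 = false) :
    pvALoop (l ++ r) s = pvALoop r s := by
  induction l with
  | nil => rfl
  | cons p t ih =>
    obtain ⟨full, abbr⟩ := p
    have h1 : PySem.Chars.isIn [' '] full = false := h _ (List.mem_cons_self ..)
    simp [pvALoop, h1, ih (fun q hq => h q (List.mem_cons_of_mem _ hq))]

theorem pvALoop_nospace (l : List (List Char × List Char)) (s : List Char)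
    (h : ∀ p ∈ l, PySem.Chars.isIn [' '] p.1 = false) :
    pvALoop l s = none := by
  rw [← List.append_nil l, pvALoop_append_nospace l [] s h]; rfl

-- what A's whole scan computes: only "ROND POINT" carries a space
theorem pvALoop_eq (s : List Char) :
    pvALoop pvPairs s =
      if PySem.Chars.startswith s ("ROND POINT".toList ++ [' ']) then
        some ("RPT".toList ++ PySem.Chars.slice s (some (PySem.Chars.len "ROND POINT".toList)) none)
      else none := by
  have e : pvPairs =
      [("AVENUE".toList, "AV".toList), ("BOULEVARD".toList, "BD".toList), ("ROUTE".toList, "RTE".toList),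
       ("CHEMIN".toList, "CHE".toList), ("ALLEE".toList, "ALL".toList), ("ALLEES".toList, "ALL".toList),
       ("IMPASSE".toList, "IMP".toList), ("PLACE".toList, "PL".toList), ("RESIDENCE".toList, "RES".toList),
       ("COURS".toList, "CRS".toList), ("SQUARE".toList, "SQ".toList), ("RUELLE".toList, "RLE".toList),
       ("MONTEE".toList, "MTE".toList), ("PROMENADE".toList, "PROM".toList), ("TRAVERSE".toList, "TRA".toList),
       ("VILLA".toList, "VLA".toList), ("SENTIER".toList, "SEN".toList), ("SENTE".toList, "SEN".toList),
       ("FAUBOURG".toList, "FG".toList), ("HAMEAU".toList, "HAM".toList), ("DOMAINE".toList, "DOM".toList),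
       ("CORNICHE".toList, "COR".toList), ("TERRASSE".toList, "TSSE".toList), ("ESPLANADE".toList, "ESP".toList),
       ("CHAUSSEE".toList, "CHS".toList)] ++
      (("ROND POINT".toList, "RPT".toList) ::
       [("QUARTIER".toList, "QUA".toList), ("PASSAGE".toList, "PAS".toList), ("LOTISSEMENT".toList, "LOT".toList)]) := rfl
  have hsp : PySem.Chars.isIn [' '] "ROND POINT".toList = true := by decide
  rw [e, pvALoop_append_nospace _ _ s (by decide), pvALoop_cons,
    pvALoop_nospace _ s (by decide), hsp, Bool.true_and]

-- a successful lookup of a key containing a space can only hit "ROND POINT"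
set_option maxHeartbeats 1000000 in
theorem pvGet?_spaced (k v : List Char) (hs : ' ' ∈ k) (h : pvDvf.get? k = some v) :
    k = "ROND POINT".toList ∧ v = "RPT".toList := by
  have hm := PySem.Dict.mem_items_of_get?_eq_some _ h
  rw [pvItems_eq] at hm
  simp only [pvPairs, List.mem_cons, List.not_mem_nil, or_false, Prod.mk.injEq] at hm
  rcases hm with h|h|h|h|h|h|h|h|h|h|h|h|h|h|h|h|h|h|h|h|h|h|h|h|h|h|h|h|h <;>
    obtain ⟨rfl, rfl⟩ := h <;>
    first
      | exact ⟨rfl, rfl⟩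
      | exact absurd hs (by decide)

-- ---- s.split(" ", 1): characterization of splitOnMax.go with maxsplit 1 ----

theorem pvGo_zero (fuel : Nat) (l cur : List Char) (acc : List (List Char)) :
    PySem.Chars.splitOnMax.go [' '] fuel 0 l cur acc = ((cur.reverse ++ l) :: acc).reverse := by
  cases fuel with
  | zero => rfl
  | succ f => cases l with
    | nil => simp [PySem.Chars.splitOnMax.go]
    | cons c r => rfl

theorem pvGo_one_nospace (s : List Char) (hs : ' ' ∉ s) :
    ∀ (fuel : Nat) (cur : List Char) (acc : List (List Char)), s.length < fuel →
    PySem.Chars.splitOnMax.go [' '] fuel 1 s cur acc = acc.reverse ++ [cur.reverse ++ s] := by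
  induction s with
  | nil => intro fuel cur acc h
           cases fuel with
           | zero => omega
           | succ f => simp [PySem.Chars.splitOnMax.go]
  | cons c r ih =>
    intro fuel cur acc h
    cases fuel with
    | zero => omega
    | succ f =>
      have hc : c ≠ ' ' := fun hh => hs (hh ▸ List.mem_cons_self ..)
      have hpre : [' '].isPrefixOf (c :: r) = false := by
        simp [List.isPrefixOf]; exact fun hh => hc hh.symm
      rw [PySem.Chars.splitOnMax.go]
      simp only [hpre, if_neg (by omega : ¬(1 = 0)), Bool.false_eq_true, if_false]
      rw [ih (fun hm => hs (List.mem_cons_of_mem _ hm)) f _ _ (by simpa using h)]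
      simp

theorem pvGo_one_word (w t : List Char) (hw : ' ' ∉ w) :
    ∀ (fuel : Nat) (cur : List Char) (acc : List (List Char)), w.length < fuel →
    PySem.Chars.splitOnMax.go [' '] fuel 1 (w ++ ' ' :: t) cur acc
      = acc.reverse ++ [cur.reverse ++ w, t] := by
  induction w with
  | nil =>
    intro fuel cur acc h
    cases fuel with
    | zero => omega
    | succ f =>
      rw [List.nil_append, PySem.Chars.splitOnMax.go]
      have hpre : [' '].isPrefixOf (' ' :: t) = true := by simp [List.isPrefixOf]
      simp only [if_neg (by omega : ¬(1 = 0)), hpre, if_true]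
      rw [pvGo_zero]
      simp
  | cons c r ih =>
    intro fuel cur acc h
    cases fuel with
    | zero => omega
    | succ f =>
      have hc : c ≠ ' ' := fun hh => hw (hh ▸ List.mem_cons_self ..)
      have hpre : [' '].isPrefixOf (c :: (r ++ ' ' :: t)) = false := by
        simp [List.isPrefixOf]; exact fun hh => hc hh.symm
      rw [List.cons_append, PySem.Chars.splitOnMax.go]
      simp only [hpre, if_neg (by omega : ¬(1 = 0)), Bool.false_eq_true, if_false]
      rw [ih (fun hm => hw (List.mem_cons_of_mem _ hm)) f _ _ (by simpa using h)]
      simp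

theorem pvSplitMax_nospace (s : List Char) (hs : ' ' ∉ s) :
    PySem.Chars.splitMax? s [' '] 1 = some [s] := by
  rw [PySem.Chars.splitMax?]
  simp only [List.isEmpty_cons, if_false, Bool.false_eq_true]
  rw [PySem.Chars.splitOnMax, if_neg (by omega)]
  rw [show (1 : Int).toNat = 1 from rfl, pvGo_one_nospace s hs _ _ _ (by omega)]
  rfl

theorem pvSplitMax_word (w t : List Char) (hw : ' ' ∉ w) :
    PySem.Chars.splitMax? (w ++ ' ' :: t) [' '] 1 = some [w, t] := by
  rw [PySem.Chars.splitMax?]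
  simp only [List.isEmpty_cons, if_false, Bool.false_eq_true]
  rw [PySem.Chars.splitOnMax, if_neg (by omega)]
  rw [show (1 : Int).toNat = 1 from rfl, pvGo_one_word w t hw _ _ _ (by simp)]
  rfl

-- ---- B's cut scan: characterization ----

theorem pvCutsGo_skip (w r : List Char) (k : Int) (cuts : List Int) (hw : ' ' ∉ w) :
    pvCutsGo (PySem.List.enumerate (w ++ r) k) cuts
      = pvCutsGo (PySem.List.enumerate r (k + w.length)) cuts := by
  induction w generalizing k with
  | nil => simp
  | cons c v ih =>
    have hc : c ≠ ' ' := fun hh => hw (hh ▸ List.mem_cons_self ..)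
    rw [List.cons_append, PySem.List.enumerate_cons, pvCutsGo, if_neg hc,
      ih (k + 1) (fun hm => hw (List.mem_cons_of_mem _ hm))]
    congr 2
    simp only [List.length_cons]
    push_cast
    ring

theorem pvCuts_nospace (s : List Char) (k : Int) (cuts : List Int) (hs : ' ' ∉ s) :
    pvCutsGo (PySem.List.enumerate s k) cuts = cuts := by
  rw [← List.append_nil s, pvCutsGo_skip s [] k cuts hs]
  rfl

theorem pvCuts_one (w t : List Char) (hw : ' ' ∉ w) (ht : ' ' ∉ t) :
    pvCutsGo (PySem.List.enumerate (w ++ ' ' :: t) 0) [] = [(w.length : Int)] := by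
  rw [pvCutsGo_skip w _ 0 [] hw, PySem.List.enumerate_cons, pvCutsGo, if_pos rfl,
    if_neg (by simp [PySem.List.len_eq]), pvCuts_nospace t _ _ ht]
  norm_num

theorem pvCuts_two (w w1 t : List Char) (hw : ' ' ∉ w) (hw1 : ' ' ∉ w1) :
    pvCutsGo (PySem.List.enumerate (w ++ ' ' :: (w1 ++ ' ' :: t)) 0) []
      = [(w.length : Int), ((w.length + 1 + w1.length : Nat) : Int)] := by
  rw [pvCutsGo_skip w _ 0 [] hw, PySem.List.enumerate_cons, pvCutsGo, if_pos rfl,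
    if_neg (by simp [PySem.List.len_eq]), pvCutsGo_skip w1 _ _ _ hw1,
    PySem.List.enumerate_cons, pvCutsGo, if_pos rfl, if_pos (by simp [PySem.List.len_eq])]
  simp only [List.nil_append, List.cons_append, List.cons.injEq]
  constructor
  · norm_num
  · constructor
    · push_cast; ring
    · trivial

-- ---- every string decomposes by its first space ----

theorem pvDecomp (s : List Char) :
    (' ' ∉ s) ∨ ∃ w t, s = w ++ ' ' :: t ∧ ' ' ∉ w := by
  induction s with
  | nil => exact Or.inl (by simp)
  | cons c r ih =>
    by_cases hc : c = ' '
    · exact Or.inr ⟨[], r, by simp [hc], by simp⟩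
    · rcases ih with h | ⟨w, t, rfl, hw⟩
      · refine Or.inl ?_
        intro hm
        rcases List.mem_cons.mp hm with h1 | h1
        · exact hc h1.symm
        · exact h h1
      · refine Or.inr ⟨c :: w, t, rfl, ?_⟩
        intro hm
        rcases List.mem_cons.mp hm with h1 | h1
        · exact hc h1.symm
        · exact hw h1

-- A's tail equals B's tail on s = w ++ ' '::t (and on space-free s)
theorem pvSingle_nospace (s : List Char) (hs : ' ' ∉ s) :
    pvASingle s = pvBTail s [] := by
  unfold pvASingle pvBTail
  rw [pvSplitMax_nospace s hs]
  simp only [Option.getD_some, if_neg (by simp : ¬(([] : List Int) ≠ [])),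
    PySem.Chars.slice_eq_listSlice, PySem.List.slice_to_natCast, PySem.List.slice_from_natCast,
    List.take_length, List.drop_length]
  cases h : pvDvf.get? s with
  | none => simp [PySem.Dict.contains_eq_isSome_get?, h, PySem.List.pyGetD_ofNat']
  | some v =>
    simp [PySem.Dict.contains_eq_isSome_get?, h, PySem.Dict.getD_eq_get?_getD,
      PySem.List.pyGetD_ofNat', PySem.List.len_eq]

theorem pvSingle_word (w t : List Char) (hw : ' ' ∉ w) :
    pvASingle (w ++ ' ' :: t) = pvBTail (w ++ ' ' :: t) [(w.length : Int)] := by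
  unfold pvASingle pvBTail
  rw [pvSplitMax_word w t hw]
  simp only [Option.getD_some, if_pos (by simp : ([(w.length : Int)] : List Int) ≠ []),
    PySem.List.pyGetD_ofNat', List.getD_cons_zero, PySem.Chars.slice_eq_listSlice,
    PySem.List.slice_to_natCast, PySem.List.slice_from_natCast,
    List.take_left, List.drop_left]
  cases h : pvDvf.get? w with
  | none => simp [PySem.Dict.contains_eq_isSome_get?, h, PySem.List.pyGetD_ofNat']
  | some v =>
    simp [PySem.Dict.contains_eq_isSome_get?, h, PySem.Dict.getD_eq_get?_getD,
      PySem.List.pyGetD_ofNat', PySem.List.len_eq]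

-- the first-space decomposition is unique
theorem pvUniq (w : List Char) (hw : ' ' ∉ w) : ∀ (w' t t' : List Char), ' ' ∉ w' →
    w ++ ' ' :: t = w' ++ ' ' :: t' → w = w' ∧ t = t' := by
  induction w with
  | nil =>
    intro w' t t' hw' h
    cases w' with
    | nil => simpa using h
    | cons c v =>
      exfalso
      rw [List.nil_append, List.cons_append, List.cons.injEq] at h
      exact hw' (h.1 ▸ List.mem_cons_self ..)
  | cons c v ih =>
    intro w' t t' hw' h
    cases w' with
    | nil =>
      exfalso
      rw [List.cons_append, List.nil_append, List.cons.injEq] at h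
      exact hw (h.1.symm ▸ List.mem_cons_self ..)
    | cons c' v' =>
      rw [List.cons_append, List.cons_append, List.cons.injEq] at h
      obtain ⟨he, ht⟩ := ih (fun hm => hw (List.mem_cons_of_mem _ hm)) v' t t'
        (fun hm => hw' (List.mem_cons_of_mem _ hm)) h.2
      exact ⟨by rw [h.1, he], ht⟩

theorem pvStartswith_rp (s : List Char) (h : PySem.Chars.startswith s ("ROND POINT".toList ++ [' ']) = true) :
    ∃ r, s = "ROND POINT".toList ++ ' ' :: r := by
  obtain ⟨r, hr⟩ := (PySem.Chars.startswith_iff _ _).mp h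
  exact ⟨r, by rw [← hr]; simp⟩

theorem pvChars_eq (s : List Char) : pvAChars s = pvBChars s := by
  rcases pvDecomp s with hs | ⟨w, t, rfl, hw⟩
  · -- no space in s at all
    by_cases hnil : s = []
    · subst hnil; decide
    · rw [pvAChars, if_neg hnil, pvItems_eq, pvALoop_eq, if_neg (by
        intro hsw
        obtain ⟨r, hr⟩ := pvStartswith_rp s hsw
        exact hs (by rw [hr]; simp)), pvBChars]
      rw [pvCuts_nospace s 0 [] hs]
      exact pvSingle_nospace s hs
  · rcases pvDecomp t with ht | ⟨w1, t1, rfl, hw1⟩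
    · -- exactly the first space, none after it
      rw [pvAChars, if_neg (by simp), pvItems_eq, pvALoop_eq, if_neg (by
        intro hsw
        obtain ⟨r, hr⟩ := pvStartswith_rp _ hsw
        obtain ⟨-, ht'⟩ := pvUniq w hw "ROND".toList t ("POINT".toList ++ ' ' :: r) (by decide)
          (by rw [hr]; simp)
        exact ht (by rw [ht']; simp)), pvBChars]
      rw [pvCuts_one w t hw ht]
      rw [if_neg (by simp [PySem.List.len_eq])]
      exact pvSingle_word w t hw
    · -- at least two spaces: s = w ++ ' ' :: (w1 ++ ' ' :: t1)
      rw [pvAChars, if_neg (by simp), pvItems_eq, pvALoop_eq, pvBChars,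
        pvCuts_two w w1 t1 hw hw1,
        if_pos (show PySem.List.len [((w.length : Nat) : Int), ((w.length + 1 + w1.length : Nat) : Int)] = 2
          from by simp [PySem.List.len_eq])]
      have hkey : PySem.Chars.slice (w ++ ' ' :: (w1 ++ ' ' :: t1)) none
          (some (PySem.List.pyGetD [(w.length : Int), ((w.length + 1 + w1.length : Nat) : Int)] 1 0))
          = w ++ ' ' :: w1 := by
        simp only [PySem.List.pyGetD_ofNat', List.getD_cons_succ, List.getD_cons_zero,
          PySem.Chars.slice_eq_listSlice, PySem.List.slice_to_natCast]
        rw [show w ++ ' ' :: (w1 ++ ' ' :: t1) = (w ++ ' ' :: w1) ++ ' ' :: t1 by simp,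
          show w.length + 1 + w1.length = (w ++ ' ' :: w1).length by simp; omega]
        exact List.take_left ..
      rw [hkey]
      cases hg : pvDvf.get? (w ++ ' ' :: w1) with
      | some abbr =>
        obtain ⟨hk, hv⟩ := pvGet?_spaced _ _ (by simp) hg
        have hsw : PySem.Chars.startswith (w ++ ' ' :: (w1 ++ ' ' :: t1))
            ("ROND POINT".toList ++ [' ']) = true := by
          refine (PySem.Chars.startswith_iff _ _).mpr ⟨t1, ?_⟩
          rw [← hk]
          simp
        rw [if_pos hsw, hv]
        simp only [PySem.List.pyGetD_ofNat', List.getD_cons_succ, List.getD_cons_zero,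
          PySem.Chars.slice_eq_listSlice, PySem.List.slice_from_natCast, PySem.Chars.len_eq]
        rw [show w.length + 1 + w1.length = (w ++ ' ' :: w1).length by simp; omega,
          show ("ROND POINT".toList).length = (w ++ ' ' :: w1).length by rw [hk]]
      | none =>
        rw [if_neg (by
          intro hsw
          obtain ⟨r, hr⟩ := pvStartswith_rp _ hsw
          obtain ⟨hwe, hte⟩ := pvUniq w hw "ROND".toList _ ("POINT".toList ++ ' ' :: r) (by decide)
            (by rw [hr]; simp)
          obtain ⟨hw1e, -⟩ := pvUniq w1 hw1 "POINT".toList t1 r (by decide) hte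
          rw [hwe, hw1e] at hg
          rw [show (("ROND".toList ++ ' ' :: "POINT".toList) : List Char) = "ROND POINT".toList by decide] at hg
          exact absurd hg (by decide))]
        rw [pvSingle_word w _ hw]
        simp [pvBTail, PySem.List.pyGetD_ofNat']

-- ===== VERDICT (by name: the statement is the Claim_ definition above) =====
theorem normalize_street_type_py_spec : Claim_equal_normalize_street_type_py := by
  intro s _
  show normalize_street_type_py s = normalize_street_type_py_alt s
  unfold normalize_street_type_py normalize_street_type_py_alt
  rw [pvChars_eq]
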